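-- pv_equiv track=rewrite | github.com/Suyash121212/E-WMEAP | backend/modules/business_logic_scanner.py | _graphql_summary
-- ===== SOURCE A (Python) =====
-- def _graphql_summary(findings: list) -> str:
--     if not findings:
--         return "GraphQL endpoint found but no critical misconfigurations detected."
--     critical = [f for f in findings if f["severity"] == "Critical"]
--     high     = [f for f in findings if f["severity"] == "High"]
--     parts    = []
--     if critical:
--         parts.append(f"{len(critical)} critical GraphQL vulnerability/ies found")
--     if high:
--         parts.append(f"{len(high)} high-severity issue(s)")
--     return ". ".join(parts) + "."
-- ===== SOURCE B (Python) =====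
-- def _graphql_summary(findings: list) -> str:
--     if not findings:
--         return "GraphQL endpoint found but no critical misconfigurations detected."
--     counts = {}
--     for f in findings:
--         sev = f["severity"]
--         counts[sev] = counts.get(sev, 0) + 1
--     specs = [("Critical", " critical GraphQL vulnerability/ies found"),
--              ("High", " high-severity issue(s)")]
--     parts = [str(counts[sev]) + suffix for sev, suffix in specs if counts.get(sev, 0)]
--     return ". ".join(parts) + "."
-- ===== Notes on version B (the rewrite author's own statement) =====
-- stated objective: idiomatic
-- what changed: Replaces A's two hard-coded filter scans and conditional parts.append branches with a single frequency dictionary over all severities plus a data-driven spec table from which the parts are generated by one comprehension.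
import Mathlib
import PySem

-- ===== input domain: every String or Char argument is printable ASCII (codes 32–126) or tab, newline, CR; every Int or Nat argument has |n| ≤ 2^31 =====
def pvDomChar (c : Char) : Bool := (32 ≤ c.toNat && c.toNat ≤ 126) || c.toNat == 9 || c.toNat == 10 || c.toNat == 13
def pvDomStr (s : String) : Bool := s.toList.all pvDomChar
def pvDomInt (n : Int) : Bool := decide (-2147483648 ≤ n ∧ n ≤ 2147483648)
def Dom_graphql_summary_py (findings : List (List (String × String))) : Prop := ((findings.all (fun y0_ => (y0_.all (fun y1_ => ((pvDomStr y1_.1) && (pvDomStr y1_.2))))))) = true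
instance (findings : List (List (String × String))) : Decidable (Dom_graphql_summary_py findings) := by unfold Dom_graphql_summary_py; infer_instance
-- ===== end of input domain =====

-- B replaces A's two hard-coded filter scans and conditional appends with one severity-frequency dictionary plus a data-driven spec table (objective: idiomatic; same behaviour).


-- first-match association-list lookup = Python dict subscript f["severity"] (key present under Pre_)
def pvLookup (f : List (String × String)) (k : String) : Option String :=
  (f.find? (fun p => p.1 == k)).map (·.2)

-- ===== PORT A =====
def graphql_summary_py (findings : List (List (String × String))) : String :=
  if findings = [] then "GraphQL endpoint found but no critical misconfigurations detected."
  else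
    let critical := findings.filter (fun f => pvLookup f "severity" == some "Critical")
    let high := findings.filter (fun f => pvLookup f "severity" == some "High")
    let parts : List String :=
      (if critical ≠ [] then
        [PySem.Int.toStr (critical.length : Int) ++ " critical GraphQL vulnerability/ies found"] else []) ++
      (if high ≠ [] then
        [PySem.Int.toStr (high.length : Int) ++ " high-severity issue(s)"] else [])
    PySem.Str.join ". " parts ++ "."

-- ===== PORT B =====
def graphql_summary_py_alt (findings : List (List (String × String))) : String :=
  if findings = [] then "GraphQL endpoint found but no critical misconfigurations detected."
  else
    let counts : PySem.Dict String Int := findings.foldl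
      (fun d f =>
        match pvLookup f "severity" with
        | some sev => d.insert sev (d.getD sev 0 + 1)
        | none => d)   -- a missing "severity" key raises KeyError in Python; excluded by Pre_
      PySem.Dict.empty
    let specs : List (String × String) :=
      [("Critical", " critical GraphQL vulnerability/ies found"),
       ("High", " high-severity issue(s)")]
    let parts : List String := specs.filterMap (fun sp =>
      if counts.getD sp.1 0 ≠ 0 then some (PySem.Int.toStr (counts.getD sp.1 0) ++ sp.2) else none)
    PySem.Str.join ". " parts ++ "."

-- ===== PRECONDITION & SPEC =====
-- Pre_ excludes exactly the findings lacking a "severity" key, on which the Python A (and B) raises KeyError.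
def Pre_graphql_summary_py (findings : List (List (String × String))) : Prop :=
  (findings.all (fun f => (pvLookup f "severity").isSome)) = true
instance (findings : List (List (String × String))) : Decidable (Pre_graphql_summary_py findings) := by unfold Pre_graphql_summary_py; infer_instance
def pvWitness_graphql_summary_py : (List (List (String × String))) :=
  [[("severity", "Critical")], [("severity", "Low")], [("severity", "High")]]
def Spec_graphql_summary_py (findings : List (List (String × String))) (out : String) : Prop := out = graphql_summary_py_alt findings
instance (findings : List (List (String × String))) (out : String) : Decidable (Spec_graphql_summary_py findings out) := by unfold Spec_graphql_summary_py; infer_instance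

-- ===== CLAIM (what is proved, stated in full; the proofs are below) =====
def Claim_equal_graphql_summary_py : Prop := ∀ (findings : List (List (String × String))), Dom_graphql_summary_py findings → Pre_graphql_summary_py findings → Spec_graphql_summary_py findings (graphql_summary_py findings)

-- ===== LEMMAS AND PROOFS =====

-- B's histogram pass counts, for every key, the findings A's per-severity filter would keep.
lemma fold_hist (l : List (List (String × String))) (d : PySem.Dict String Int) (k : String) :
    ((l.foldl
      (fun d f =>
        match pvLookup f "severity" with
        | some sev => d.insert sev (d.getD sev 0 + 1)
        | none => d)
      d).getD k 0)
    = d.getD k 0 + ((l.filter (fun f => pvLookup f "severity" == some k)).length : Int) := by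
  induction l generalizing d with
  | nil => simp
  | cons x xs ih =>
    rw [List.foldl_cons]
    cases hx : pvLookup x "severity" with
    | none => rw [ih]; simp [hx]
    | some s =>
      rw [ih]
      by_cases hks : s = k
      · subst hks
        simp [hx]
        omega
      · have : ¬ (pvLookup x "severity" == some k) = true := by simp [hx, hks]
        simp [PySem.Dict.getD_insert, Ne.symm hks, this]

-- ===== VERDICT (by name: the statement is the Claim_ definition above) =====
theorem graphql_summary_py_spec : Claim_equal_graphql_summary_py := by
  intro findings _ _
  unfold Spec_graphql_summary_py graphql_summary_py graphql_summary_py_alt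
  by_cases hnil : findings = []
  · simp [hnil]
  · simp only [if_neg hnil, List.filterMap_cons, List.filterMap_nil]
    rw [fold_hist, fold_hist]
    simp only [PySem.Dict.getD_empty, zero_add]
    set c := findings.filter (fun f => pvLookup f "severity" == some "Critical") with hc
    set h := findings.filter (fun f => pvLookup f "severity" == some "High") with hh
    by_cases h1 : c = []
    · by_cases h2 : h = []
      · simp [h1, h2]
      · have : h.length ≠ 0 := by simpa [List.length_eq_zero_iff] using h2
        simp [h1, h2, this]
    · have hc0 : c.length ≠ 0 := by simpa [List.length_eq_zero_iff] using h1
      by_cases h2 : h = []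
      · simp [h1, h2, hc0]
      · have hh0 : h.length ≠ 0 := by simpa [List.length_eq_zero_iff] using h2
        simp [h1, h2, hc0, hh0]
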